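-- pv_equiv track=rewrite | github.com/MrBrantCode/unitest_baseline | mut_generate/mist_train_cf/cf_48545/solution.py | advanced_subword_check
-- ===== SOURCE A (Python) =====
-- def advanced_subword_check(a, b):
--     from collections import Counter
--
--     # Check if string b or its rotations are subwords in string a
--     for i in range(len(b)):
--         if b in a:
--             return True
--         else:
--             b = b[1:] + b[0]
--
--     # Check if string b can become a subword of string a
--     # by rearranging all its letters in any order
--     counterA = Counter(a)
--     counterB = Counter(b)
--
--     for letter, count in counterB.items():
--         if letter not in counterA.keys() or count > counterA[letter]:
--             return False
--
--     return True
-- ===== SOURCE B (Python) =====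
-- def advanced_subword_check(a, b):
--     # Scan windows of a against b+b (a window of length len(b) is a substring
--     # of b+b iff it is a rotation of b), then multiset-containment via counts.
--     m = len(b)
--     n = len(a)
--     bb = b + b
--     for j in range(n - m + 1):
--         if a[j:j + m] in bb:
--             return True
--     for ch in set(b):
--         if b.count(ch) > a.count(ch):
--             return False
--     return True
-- ===== Notes on version B (the rewrite author's own statement) =====
-- stated objective: faster
-- what changed: Instead of rotating b len(b) times and searching each rotation in a (m substring searches over a), B slides a window over a and tests each length-len(b) window for membership in b+b (windows of b+b of length len(b) are exactly the rotations of b), and replaces the Counter-dict loop by direct count comparisons over set(b).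
import Mathlib
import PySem

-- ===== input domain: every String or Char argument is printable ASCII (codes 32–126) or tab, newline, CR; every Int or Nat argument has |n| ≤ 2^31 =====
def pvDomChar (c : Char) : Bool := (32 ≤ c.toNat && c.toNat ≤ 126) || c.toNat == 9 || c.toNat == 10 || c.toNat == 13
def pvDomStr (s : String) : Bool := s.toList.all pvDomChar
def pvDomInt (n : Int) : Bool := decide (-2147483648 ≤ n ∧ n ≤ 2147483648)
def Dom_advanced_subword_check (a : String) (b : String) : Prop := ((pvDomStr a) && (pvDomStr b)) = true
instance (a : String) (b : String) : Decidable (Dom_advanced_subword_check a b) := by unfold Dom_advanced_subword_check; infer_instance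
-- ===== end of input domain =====

-- B replaces A's rotate-and-search loop by a window scan of a against b+b (windows of
-- b+b of length len(b) are exactly the rotations of b; measured faster by the timing
-- run) and the Counter loop by direct count comparisons over set(b).


-- ===== PORT A =====
-- 'for i in range(len(b)): if b in a: return True; else: b = b[1:] + b[0]'
-- none = early 'return True'; some bFinal = loop finished with b = bFinal.
-- (b[0] is PySem.List.pyGet?; its none case — Python's IndexError — is unreachable,
--  since the loop body only runs when len(b) ≥ 1.)
def pvA_rotLoop (a : List Char) : Nat → List Char → Option (List Char)
  | 0, b => some b
  | k + 1, b =>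
    if PySem.Chars.isIn b a then none
    else pvA_rotLoop a k (PySem.List.slice b (some 1) none ++ (PySem.List.pyGet? b 0).toList)

-- 'for letter, count in counterB.items(): if letter not in counterA.keys() or count > counterA[letter]: return False'
def pvA_counterLoop (cA : PySem.Dict Char Int) : List (Char × Int) → Bool
  | [] => true
  | (letter, count) :: rest =>
    if !(cA.contains letter) || count > cA.getD letter 0 then false
    else pvA_counterLoop cA rest

def advanced_subword_check (a : String) (b : String) : Bool :=
  match pvA_rotLoop a.toList b.toList.length b.toList with
  | none => true
  | some bFinal =>
    pvA_counterLoop (PySem.Dict.counter a.toList) (PySem.Dict.counter bFinal).items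

-- ===== PORT B =====
-- 'for j in range(n - m + 1): if a[j:j+m] in bb: return True'
def pvB_windowLoop (a bb : List Char) (m : Int) : List Int → Bool
  | [] => false
  | j :: rest =>
    if PySem.Chars.isIn (PySem.List.slice a (some j) (some (j + m))) bb then true
    else pvB_windowLoop a bb m rest

-- 'for ch in set(b): if b.count(ch) > a.count(ch): return False'  (all/any over a set
-- is independent of Python's set iteration order)
def pvB_setLoop (al bl : List Char) : List Char → Bool
  | [] => true
  | ch :: rest =>
    if PySem.List.count bl ch > PySem.List.count al ch then false
    else pvB_setLoop al bl rest

def advanced_subword_check_alt (a : String) (b : String) : Bool :=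
  let al := a.toList
  let bl := b.toList
  let m : Int := bl.length
  let n : Int := al.length
  let bb := bl ++ bl
  if pvB_windowLoop al bb m (PySem.List.pyRange 0 (n - m + 1) 1) then true
  else pvB_setLoop al bl (PySem.Set.ofList bl)

-- ===== PRECONDITION & SPEC =====
def Spec_advanced_subword_check (a : String) (b : String) (out : Bool) : Prop := out = advanced_subword_check_alt a b
instance (a : String) (b : String) (out : Bool) : Decidable (Spec_advanced_subword_check a b out) := by unfold Spec_advanced_subword_check; infer_instance

-- ===== CLAIM (what is proved, stated in full; the proofs are below) =====
def Claim_equal_advanced_subword_check : Prop := ∀ (a : String) (b : String), Dom_advanced_subword_check a b → Spec_advanced_subword_check a b (advanced_subword_check a b)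

-- ===== LEMMAS AND PROOFS =====

def pvRot (bl : List Char) (i : Nat) : List Char := bl.drop i ++ bl.take i
theorem pvRot_zero (bl : List Char) : pvRot bl 0 = bl := by simp [pvRot]
theorem pvRot_length (bl : List Char) (i : Nat) : (pvRot bl i).length = bl.length := by
  simp [pvRot]; omega
theorem pvRot_full (bl : List Char) : pvRot bl bl.length = bl := by simp [pvRot]
theorem pvRot_step (bl : List Char) (i : Nat) (h : i < bl.length) :
    PySem.List.slice (pvRot bl i) (some 1) none ++ (PySem.List.pyGet? (pvRot bl i) 0).toList
      = pvRot bl (i + 1) := by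
  have hd : bl.drop i = bl[i] :: bl.drop (i + 1) := List.drop_eq_getElem_cons h
  have h0 : (PySem.List.pyGet? (pvRot bl i) ((0 : Nat) : Int)) = (pvRot bl i)[0]? :=
    PySem.List.pyGet?_natCast _ 0
  rw [PySem.List.slice_from_one]
  simp only [pvRot, hd, Nat.cast_zero] at *
  rw [h0]
  simp only [List.cons_append, List.getElem?_cons_zero, Option.toList_some, List.tail_cons,
    List.take_add_one, List.getElem?_eq_getElem h]
  simp

theorem pvA_rotLoop_spec (al bl : List Char) (k i : Nat) (hk : i + k = bl.length) :
    pvA_rotLoop al k (pvRot bl i)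
      = if ∃ t, t < k ∧ PySem.Chars.isIn (pvRot bl (i + t)) al = true then none
        else some (pvRot bl (i + k)) := by
  induction k generalizing i with
  | zero => simp [pvA_rotLoop]
  | succ k ih =>
    have hi : i < bl.length := by omega
    rw [pvA_rotLoop, pvRot_step bl i hi]
    by_cases h0 : PySem.Chars.isIn (pvRot bl i) al = true
    · rw [if_pos h0, if_pos ⟨0, by omega, by simpa using h0⟩]
    · rw [if_neg h0, ih (i+1) (by omega)]
      by_cases h1 : ∃ t, t < k ∧ PySem.Chars.isIn (pvRot bl (i + 1 + t)) al = true
      · obtain ⟨t, ht, hh⟩ := h1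
        rw [if_pos ⟨t, ht, hh⟩,
          if_pos ⟨t+1, by omega, by rw [show i + (t+1) = i+1+t by omega]; exact hh⟩]
      · rw [if_neg h1, if_neg ?_, show i + 1 + k = i + (k+1) by omega]
        rintro ⟨t, ht, hh⟩
        match t with
        | 0 => exact h0 (by simpa using hh)
        | t+1 => exact h1 ⟨t, by omega, by rw [show i+1+t = i + (t+1) by omega]; exact hh⟩

theorem pv_window_bb (bl : List Char) (k : Nat) (hk : k ≤ bl.length) :
    ((bl ++ bl).drop k).take bl.length = pvRot bl k := by
  rw [List.drop_append, List.take_append]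
  have h1 : k - bl.length = 0 := by omega
  have h2 : (bl.drop k).length = bl.length - k := by simp
  rw [h1]
  simp only [List.drop_zero, h2]
  rw [List.take_of_length_le (by omega)]
  have h3 : bl.length - (bl.length - k) = k := by omega
  rw [h3]; rfl

theorem pv_search_iff (al bl : List Char) (hm : bl ≠ []) :
    (∃ t, t < bl.length ∧ PySem.Chars.isIn (pvRot bl t) al = true)
      ↔ (∃ j : Int, 0 ≤ j ∧ j < (al.length : Int) - bl.length + 1 ∧
            PySem.Chars.isIn (PySem.List.slice al (some j) (some (j + (bl.length : Int)))) (bl ++ bl) = true) := by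
  have hmpos : 0 < bl.length := List.length_pos_iff.mpr hm
  constructor
  · rintro ⟨t, ht, hin⟩
    rw [PySem.Chars.isIn_iff_infix] at hin
    obtain ⟨s, u, hsu⟩ := hin
    have hlen : (pvRot bl t).length = bl.length := pvRot_length bl t
    have hn : s.length + bl.length + u.length = al.length := by
      have := congrArg List.length hsu
      simp at this; omega
    refine ⟨(s.length : Int), by positivity, by omega, ?_⟩
    have hslice : PySem.List.slice al (some (s.length : Int)) (some ((s.length : Int) + (bl.length : Int)))
        = (al.drop s.length).take bl.length := by
      have := PySem.List.slice_natCast_add al s.length bl.length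
      exact this
    rw [hslice]
    have hdrop : al.drop s.length = pvRot bl t ++ u := by
      rw [← hsu, List.append_assoc, List.drop_left]
    rw [hdrop, ← hlen, List.take_left, PySem.Chars.isIn_iff_infix]
    refine ⟨bl.take t, bl.drop t, ?_⟩
    simp only [pvRot, List.append_assoc, List.take_append_drop]
    rw [← List.append_assoc, List.take_append_drop]
  · rintro ⟨j, hj0, hjlt, hin⟩
    set jn := j.toNat with hjn
    have hj : j = (jn : Int) := (Int.toNat_of_nonneg hj0).symm
    have hmn : bl.length ≤ al.length := by omega
    have hjm : jn + bl.length ≤ al.length := by omega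
    have hslice : PySem.List.slice al (some j) (some (j + (bl.length : Int)))
        = (al.drop jn).take bl.length := by
      rw [hj]
      have := PySem.List.slice_natCast_add al jn bl.length
      push_cast at this ⊢; exact this
    rw [hslice, PySem.Chars.isIn_iff_infix] at hin
    set w := (al.drop jn).take bl.length with hw
    have hwlen : w.length = bl.length := by simp [hw]; omega
    have hwal : w <:+: al := ((List.take_prefix _ _).isInfix).trans (List.drop_suffix jn al).isInfix
    obtain ⟨s, u, hsu⟩ := hin
    have hk2 : s.length + bl.length + u.length = bl.length + bl.length := by
      have := congrArg List.length hsu; simp [hwlen] at this; omega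
    have hkle : s.length ≤ bl.length := by omega
    have hwrot : w = pvRot bl s.length := by
      have hdrop : (bl ++ bl).drop s.length = w ++ u := by rw [← hsu, List.append_assoc, List.drop_left]
      have : ((bl ++ bl).drop s.length).take bl.length = w := by
        rw [hdrop, ← hwlen, List.take_left]
      rw [← this, pv_window_bb bl s.length hkle]
    by_cases hks : s.length = bl.length
    · refine ⟨0, hmpos, ?_⟩
      rw [PySem.Chars.isIn_iff_infix, pvRot_zero]
      have : w = bl := by rw [hwrot, hks, pvRot_full]
      exact this ▸ hwal
    · refine ⟨s.length, by omega, ?_⟩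
      rw [PySem.Chars.isIn_iff_infix, ← hwrot]
      exact hwal

theorem pvB_windowLoop_eq (al bb : List Char) (m : Int) (l : List Int) :
    pvB_windowLoop al bb m l
      = l.any (fun j => PySem.Chars.isIn (PySem.List.slice al (some j) (some (j + m))) bb) := by
  induction l with
  | nil => rfl
  | cons j rest ih =>
    simp only [pvB_windowLoop, List.any_cons, ← ih]
    split_ifs with h <;> simp [h]

theorem pvB_setLoop_eq (al bl : List Char) (l : List Char) :
    pvB_setLoop al bl l = l.all (fun ch => decide (List.count ch bl ≤ List.count ch al)) := by
  induction l with
  | nil => rfl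
  | cons ch rest ih =>
    simp only [pvB_setLoop, List.all_cons, ← ih, PySem.List.count_eq]
    split_ifs with h
    · simp; omega
    · simp; omega

theorem pvA_counterLoop_eq (cA : PySem.Dict Char Int) (l : List (Char × Int)) :
    pvA_counterLoop cA l = l.all (fun p => cA.contains p.1 && decide (p.2 ≤ cA.getD p.1 0)) := by
  induction l with
  | nil => rfl
  | cons p rest ih =>
    obtain ⟨letter, count⟩ := p
    simp only [pvA_counterLoop, List.all_cons, ← ih]
    cases hc : cA.contains letter with
    | false => simp
    | true =>
      simp only [Bool.not_true, Bool.false_or, Bool.true_and]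
      by_cases hle : count ≤ cA.getD letter 0
      · simp [hle, not_lt.mpr hle]
      · simp [hle, lt_of_not_ge hle]

theorem pv_all_congr {α : Type} (l : List α) (f g : α → Bool)
    (h : ∀ x ∈ l, f x = g x) : l.all f = l.all g := by
  induction l with
  | nil => rfl
  | cons x rest ih =>
    simp only [List.all_cons, h x (List.mem_cons_self), ih (fun y hy => h y (List.mem_cons_of_mem x hy))]

theorem pv_anag_eq (al bl : List Char) :
    pvA_counterLoop (PySem.Dict.counter al) (PySem.Dict.counter bl).items
      = pvB_setLoop al bl (PySem.Set.ofList bl) := by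
  rw [pvA_counterLoop_eq, pvB_setLoop_eq, PySem.Dict.items_counter, List.all_map]
  apply pv_all_congr
  intro x hx
  have hxbl : x ∈ bl := (PySem.Set.mem_ofList bl x).mp hx
  have hcnt : 0 < List.count x bl := List.count_pos_iff.mpr hxbl
  simp only [Function.comp, PySem.Dict.contains_counter, PySem.Dict.getD_counter]
  by_cases hle : List.count x bl ≤ List.count x al
  · have hal : x ∈ al := List.count_pos_iff.mp (by omega)
    simp [hle, hal, Int.ofNat_le.mpr hle]
  · have : ¬ ((List.count x bl : Int) ≤ (List.count x al : Int)) := by exact_mod_cast hle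
    simp [hle, this]

-- ===== VERDICT (by name: the statement is the Claim_ definition above) =====
theorem advanced_subword_check_spec : Claim_equal_advanced_subword_check := by
  intro a b _
  unfold Spec_advanced_subword_check advanced_subword_check advanced_subword_check_alt
  have hA := pvA_rotLoop_spec a.toList b.toList b.toList.length 0 (by omega)
  rw [pvRot_zero] at hA
  simp only [Nat.zero_add] at hA
  rw [hA, pvRot_full]
  dsimp only
  rw [pvB_windowLoop_eq]
  by_cases hbl : b.toList = []
  · -- len(b) = 0: A's loop never runs and Counter('') is empty, so A returns True;
    -- B's if returns true in both branches (the empty-set loop is true).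
    have hc1 : ¬ ∃ t < b.toList.length, PySem.Chars.isIn (pvRot b.toList t) a.toList = true := by
      simp [hbl]
    rw [if_neg hc1]
    dsimp only
    have hL : pvA_counterLoop (PySem.Dict.counter a.toList) (PySem.Dict.counter b.toList).items
        = true := by
      rw [hbl]; rfl
    have hR : pvB_setLoop a.toList b.toList (PySem.Set.ofList b.toList) = true := by
      rw [hbl]; rfl
    rw [hL]
    split <;> simp [hR]
  · by_cases hc1 : ∃ t < b.toList.length, PySem.Chars.isIn (pvRot b.toList t) a.toList = true
    · rw [if_pos hc1]
      obtain ⟨j, hj0, hjlt, hin⟩ := (pv_search_iff a.toList b.toList hbl).mp hc1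
      have hany : (PySem.List.pyRange 0 ((a.toList.length : Int) - b.toList.length + 1)).any
          (fun j => PySem.Chars.isIn
            (PySem.List.slice a.toList (some j) (some (j + (b.toList.length : Int))))
            (b.toList ++ b.toList)) = true :=
        List.any_eq_true.mpr ⟨j, PySem.List.mem_pyRange_one.mpr ⟨hj0, hjlt⟩, hin⟩
      rw [if_pos hany]
    · rw [if_neg hc1]
      have hany : ¬ ((PySem.List.pyRange 0 ((a.toList.length : Int) - b.toList.length + 1)).any
          (fun j => PySem.Chars.isIn
            (PySem.List.slice a.toList (some j) (some (j + (b.toList.length : Int))))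
            (b.toList ++ b.toList)) = true) := by
        intro h
        obtain ⟨j, hjmem, hin⟩ := List.any_eq_true.mp h
        obtain ⟨hj0, hjlt⟩ := PySem.List.mem_pyRange_one.mp hjmem
        exact hc1 ((pv_search_iff a.toList b.toList hbl).mpr ⟨j, hj0, hjlt, hin⟩)
      rw [if_neg hany]
      dsimp only
      rw [pv_anag_eq]
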